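-- pv_equiv track=rewrite | github.com/denora-antonella/OntologiaBiblioteca | valutazione_sperimentale/runner_esperimenti.py | costruisci_distanze_bfs
-- ===== SOURCE A (Python) =====
-- from collections import deque
--
-- def costruisci_distanze_bfs(grafo, nodi_interesse):
--     """
--     Precalcola le distanze minime tra alcuni nodi,
--     usando una semplice BFS a costo uniforme.
--     """
--
--     distanze = {}
--
--     for sorgente in nodi_interesse:
--         dist_sorg = {sorgente: 0}
--         coda = deque([sorgente])
--
--         while coda:
--             corrente = coda.popleft()
--             passi = dist_sorg[corrente]
--
--             for vicino in grafo.get(corrente, {}).keys():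
--                 if vicino not in dist_sorg:
--                     dist_sorg[vicino] = passi + 1
--                     coda.append(vicino)
--
--         distanze[sorgente] = dist_sorg
--
--     return distanze
-- ===== SOURCE B (Python) =====
-- def costruisci_distanze_bfs(grafo, nodi_interesse):
--     """
--     Precalcola le distanze minime con una BFS in due fasi: prima si
--     costruiscono i livelli (liste di nodi scoperti, usando solo un
--     insieme 'visitati', senza alcun dizionario di distanze durante la
--     visita), poi il dizionario delle distanze si ottiene enumerando i
--     livelli.
--     """
--     distanze = {}
--     grafo_get = grafo.get
--     vuoto = {}
--     for sorgente in nodi_interesse: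
--         visitati = {sorgente}
--         livelli = []
--         corrente = [sorgente]
--         while corrente:
--             livelli.append(corrente)
--             prossimo = []
--             aggiungi = prossimo.append
--             for nodo in corrente:
--                 for vicino in grafo_get(nodo, vuoto).keys():
--                     if vicino not in visitati:
--                         visitati.add(vicino)
--                         aggiungi(vicino)
--             corrente = prossimo
--         dist_sorg = {}
--         for passi, livello in enumerate(livelli):
--             for nodo in livello:
--                 dist_sorg[nodo] = passi
--         distanze[sorgente] = dist_sorg
--     return distanze
-- ===== Notes on version B (the rewrite author's own statement) =====
-- stated objective: alternative
-- what changed: Replaced the single-dict deque BFS by a two-phase traversal: the graph walk only maintains a visited set and collects the discovery levels as lists, and the distance dictionary is built afterwards by enumerating the levels, so no distance dict (and no per-node distance read) exists during the traversal.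
import Mathlib
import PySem

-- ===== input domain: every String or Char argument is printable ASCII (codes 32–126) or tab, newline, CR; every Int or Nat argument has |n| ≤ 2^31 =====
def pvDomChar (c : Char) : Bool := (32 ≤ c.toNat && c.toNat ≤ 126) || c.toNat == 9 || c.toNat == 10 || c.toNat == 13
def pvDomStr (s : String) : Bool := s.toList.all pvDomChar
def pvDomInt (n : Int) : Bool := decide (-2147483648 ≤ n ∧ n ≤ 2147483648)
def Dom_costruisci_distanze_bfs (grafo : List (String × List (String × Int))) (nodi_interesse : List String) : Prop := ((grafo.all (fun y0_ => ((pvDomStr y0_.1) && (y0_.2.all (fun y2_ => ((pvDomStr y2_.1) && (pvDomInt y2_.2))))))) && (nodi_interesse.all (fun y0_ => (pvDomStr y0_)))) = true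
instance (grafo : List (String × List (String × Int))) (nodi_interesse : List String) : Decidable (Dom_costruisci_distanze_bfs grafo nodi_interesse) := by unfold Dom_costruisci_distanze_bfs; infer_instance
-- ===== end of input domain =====

-- B replaces A's single-pass deque BFS (distance dict maintained during the walk) by a
-- two-phase traversal: the walk keeps only a visited SET and the list of discovery
-- levels, and the distance dict is built afterwards by enumerating the levels.

-- ===== PORT A =====
-- grafo.get(nodo, {}).keys()  (the same Python expression occurs in A and in B)
def pvVicini (grafo : List (String × List (String × Int))) (nodo : String) : List String :=
  ((PySem.Dict.mk grafo).getD nodo []).map (·.1)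

-- fuel bound for both while-loops: the number of queue pops (resp. BFS levels) is at
-- most 1 + the number of neighbour entries of grafo, since every node discovered after
-- the source is a fresh key drawn from the neighbour entries; sufficiency is established
-- by the simulation lemmas below, so the fuel-0 branch is never taken.
def pvFuel (grafo : List (String × List (String × Int))) : Nat :=
  (grafo.flatMap (fun p => p.2.map (·.1))).length + 1

-- A's 'while coda:' loop.  Python reads dist_sorg[corrente]; ported as getD with
-- default 0 — exact because every queued node is a key of dist_sorg (no KeyError).
def pvLoopA (grafo : List (String × List (String × Int))) :
    Nat → PySem.Dict String Int → List String → PySem.Dict String Int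
  | 0, dist, _ => dist
  | _+1, dist, [] => dist
  | f+1, dist, corrente :: coda =>
      let passi := dist.getD corrente 0
      let st := (pvVicini grafo corrente).foldl
        (fun (st : PySem.Dict String Int × List String) vicino =>
          if !st.1.contains vicino then (st.1.insert vicino (passi + 1), st.2 ++ [vicino])
          else st) (dist, coda)
      pvLoopA grafo f st.1 st.2

def costruisci_distanze_bfs (grafo : List (String × List (String × Int))) (nodi_interesse : List String) : List (String × List (String × Int)) :=
  (nodi_interesse.foldl
    (fun (distanze : PySem.Dict String (List (String × Int))) sorgente =>
      distanze.insert sorgente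
        (pvLoopA grafo (pvFuel grafo) (PySem.Dict.ofList [(sorgente, 0)]) [sorgente]).items)
    PySem.Dict.empty).items

-- ===== PORT B =====
-- B's 'while corrente:' loop: collects the discovery levels, maintaining only the
-- visited set (fuel-0 branch never reached: pvFuel suffices, see the lemmas).
def pvLivelli (grafo : List (String × List (String × Int))) :
    Nat → PySem.Set String → List String → List (List String)
  | 0, _, _ => []
  | _+1, _, [] => []
  | f+1, visitati, c :: cs =>
      let st := (c :: cs).foldl
        (fun (st : PySem.Set String × List String) nodo =>
          (pvVicini grafo nodo).foldl
            (fun (st : PySem.Set String × List String) vicino =>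
              if !(PySem.Set.contains st.1 vicino) then (PySem.Set.add st.1 vicino, st.2 ++ [vicino])
              else st) st) (visitati, [])
      (c :: cs) :: pvLivelli grafo f st.1 st.2

def costruisci_distanze_bfs_alt (grafo : List (String × List (String × Int))) (nodi_interesse : List String) : List (String × List (String × Int)) :=
  (nodi_interesse.foldl
    (fun (distanze : PySem.Dict String (List (String × Int))) sorgente =>
      let livelli := pvLivelli grafo (pvFuel grafo) (PySem.Set.ofList [sorgente]) [sorgente]
      distanze.insert sorgente
        ((PySem.List.enumerate livelli 0).foldl
          (fun (dist_sorg : PySem.Dict String Int) pl =>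
            pl.2.foldl (fun (dist_sorg : PySem.Dict String Int) nodo => dist_sorg.insert nodo pl.1) dist_sorg)
          PySem.Dict.empty).items)
    PySem.Dict.empty).items

-- ===== PRECONDITION & SPEC =====
def Spec_costruisci_distanze_bfs (grafo : List (String × List (String × Int))) (nodi_interesse : List String) (out : List (String × List (String × Int))) : Prop := out = costruisci_distanze_bfs_alt grafo nodi_interesse
instance (grafo : List (String × List (String × Int))) (nodi_interesse : List String) (out : List (String × List (String × Int))) : Decidable (Spec_costruisci_distanze_bfs grafo nodi_interesse out) := by unfold Spec_costruisci_distanze_bfs; infer_instance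

-- ===== CLAIM (what is proved, stated in full; the proofs are below) =====
def Claim_equal_costruisci_distanze_bfs : Prop := ∀ (grafo : List (String × List (String × Int))) (nodi_interesse : List String), Dom_costruisci_distanze_bfs grafo nodi_interesse → Spec_costruisci_distanze_bfs grafo nodi_interesse (costruisci_distanze_bfs grafo nodi_interesse)

-- ===== LEMMAS AND PROOFS =====

-- the one-neighbour step of A's loop, abstracted over the assigned distance w
def pvStep (w : Int) (st : PySem.Dict String Int × List String) (v : String) :
    PySem.Dict String Int × List String :=
  if !st.1.contains v then (st.1.insert v w, st.2 ++ [v]) else st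

-- the one-neighbour step of B's loop (visited set instead of distance dict)
def pvStepB (st : PySem.Set String × List String) (v : String) :
    PySem.Set String × List String :=
  if !(PySem.Set.contains st.1 v) then (PySem.Set.add st.1 v, st.2 ++ [v]) else st

-- one BFS level as A computes it
def pvLevel (g : List (String × List (String × Int))) (w : Int)
    (st : PySem.Dict String Int × List String) (cur : List String) :
    PySem.Dict String Int × List String :=
  cur.foldl (fun st c => (pvVicini g c).foldl (pvStep w) st) st

-- the final dict-building phase of B, one level at a time
def pvInsFrom : PySem.Dict String Int → List (List String) → Int → PySem.Dict String Int
  | d, [], _ => d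
  | d, cur :: rest, w => pvInsFrom (cur.foldl (fun d v => d.insert v w) d) rest (w + 1)

lemma loopA_nil (g : List (String × List (String × Int))) (f : Nat) (d : PySem.Dict String Int) :
    pvLoopA g f d [] = d := by cases f <;> rfl

lemma loopA_cons (g : List (String × List (String × Int))) (f : Nat) (d : PySem.Dict String Int)
    (c : String) (q : List String) :
    pvLoopA g (f+1) d (c :: q) =
      pvLoopA g f ((pvVicini g c).foldl (pvStep (d.getD c 0 + 1)) (d, q)).1
        ((pvVicini g c).foldl (pvStep (d.getD c 0 + 1)) (d, q)).2 := rfl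

lemma livelli_nil (g : List (String × List (String × Int))) (f : Nat) (s : PySem.Set String) :
    pvLivelli g f s [] = [] := by cases f <;> rfl

lemma livelli_cons (g : List (String × List (String × Int))) (f : Nat) (s : PySem.Set String)
    (c : String) (q : List String) :
    pvLivelli g (f+1) s (c :: q) =
      (c :: q) :: pvLivelli g f
        ((c :: q).foldl (fun st c' => (pvVicini g c').foldl pvStepB st) (s, [])).1
        ((c :: q).foldl (fun st c' => (pvVicini g c').foldl pvStepB st) (s, [])).2 := rfl

-- B's enumerate-fold is exactly pvInsFrom
lemma enumFold : ∀ (lvls : List (List String)) (w : Int) (d : PySem.Dict String Int),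
    (PySem.List.enumerate lvls w).foldl
        (fun (d : PySem.Dict String Int) pl =>
          pl.2.foldl (fun (d : PySem.Dict String Int) nodo => d.insert nodo pl.1) d) d
      = pvInsFrom d lvls w := by
  intro lvls
  induction lvls with
  | nil => intro w d; rfl
  | cons c t ih =>
    intro w d
    rw [PySem.List.enumerate_cons, List.foldl_cons]
    exact ih (w+1) _

-- the dict a pvStep fold produces does not depend on what is already queued, and the
-- queued part is only appended to
lemma stepFold_shift (w : Int) : ∀ (l : List String) (d : PySem.Dict String Int) (q : List String),
    l.foldl (pvStep w) (d, q) =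
      ((l.foldl (pvStep w) (d, [])).1, q ++ (l.foldl (pvStep w) (d, [])).2) := by
  intro l
  induction l with
  | nil => intro d q; simp
  | cons v t ih =>
    intro d q
    by_cases h : d.contains v = true
    · have hstep : ∀ q', pvStep w (d, q') v = (d, q') := by intro q'; simp [pvStep, h]
      rw [List.foldl_cons, List.foldl_cons, hstep, hstep]
      exact ih d q
    · have hstep : ∀ q', pvStep w (d, q') v = (d.insert v w, q' ++ [v]) := by
        intro q'; simp [pvStep, h]
      rw [List.foldl_cons, List.foldl_cons, hstep, hstep,
        ih (d.insert v w) (q ++ [v]), ih (d.insert v w) ([] ++ [v])]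
      simp

-- the invariants of one pvStep fold, proved together
lemma stepFold_inv (w : Int) : ∀ (l : List String) (d : PySem.Dict String Int) (q : List String),
    (∀ k, d.contains k = true →
        (l.foldl (pvStep w) (d, q)).1.contains k = true ∧
        (l.foldl (pvStep w) (d, q)).1.getD k 0 = d.getD k 0)
    ∧ (∀ v ∈ (l.foldl (pvStep w) (d, q)).2, v ∈ q ∨
        (v ∈ l ∧ (l.foldl (pvStep w) (d, q)).1.contains v = true ∧
          (l.foldl (pvStep w) (d, q)).1.getD v 0 = w))
    ∧ (∀ k ∈ (l.foldl (pvStep w) (d, q)).1.keys, k ∈ d.keys ∨ k ∈ l)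
    ∧ (d.keys.Nodup → (l.foldl (pvStep w) (d, q)).1.keys.Nodup)
    ∧ ((l.foldl (pvStep w) (d, q)).1.size + q.length = d.size + (l.foldl (pvStep w) (d, q)).2.length) := by
  intro l
  induction l with
  | nil =>
    intro d q
    exact ⟨fun k hk => ⟨hk, rfl⟩, fun v hv => Or.inl hv, fun k hk => Or.inl hk, id, rfl⟩
  | cons v t ih =>
    intro d q
    by_cases h : d.contains v = true
    · have hstep : pvStep w (d, q) v = (d, q) := by simp [pvStep, h]
      simp only [List.foldl_cons, hstep]
      obtain ⟨i1, i2, i3, i4, i5⟩ := ih d q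
      refine ⟨i1, fun x hx => ?_, fun k hk => (i3 k hk).imp_right (List.mem_cons_of_mem v), i4, i5⟩
      rcases i2 x hx with hq | ⟨hm, hc, hg⟩
      · exact Or.inl hq
      · exact Or.inr ⟨List.mem_cons_of_mem _ hm, hc, hg⟩
    · have hstep : pvStep w (d, q) v = (d.insert v w, q ++ [v]) := by simp [pvStep, h]
      simp only [List.foldl_cons, hstep]
      obtain ⟨i1, i2, i3, i4, i5⟩ := ih (d.insert v w) (q ++ [v])
      refine ⟨fun k hk => ?_, fun x hx => ?_, fun k hk => ?_, fun hnd => ?_, ?_⟩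
      · have hne : k ≠ v := by
          intro he; subst he; exact absurd hk h
        have hthis := i1 k (by simp [PySem.Dict.contains_insert, hk])
        rw [PySem.Dict.getD_insert] at hthis
        simpa [hne] using hthis
      · rcases i2 x hx with hq | ⟨hm, hc, hg⟩
        · rcases List.mem_append.mp hq with hq' | hx'
          · exact Or.inl hq'
          · have hxv : x = v := by simpa using hx'
            subst hxv
            have hthis := i1 x (by simp)
            rw [PySem.Dict.getD_insert] at hthis
            exact Or.inr ⟨List.mem_cons_self, hthis.1, by simpa using hthis.2⟩
        · exact Or.inr ⟨List.mem_cons_of_mem _ hm, hc, hg⟩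
      · rcases i3 k hk with hk' | hk'
        · rw [PySem.Dict.mem_keys_insert] at hk'
          rcases hk' with he | hm
          · exact Or.inr (he ▸ List.mem_cons_self)
          · exact Or.inl hm
        · exact Or.inr (List.mem_cons_of_mem _ hk')
      · exact i4 (PySem.Dict.nodup_keys_insert _ _ _ hnd)
      · have hsz : (d.insert v w).size = d.size + 1 := by
          rw [PySem.Dict.size_insert]; simp [h]
        simp only [hsz, List.length_append, List.length_cons, List.length_nil] at i5 ⊢
        omega

-- A's pvStep fold and B's pvStepB fold walk in lockstep: same discovery list, the
-- dict and the set contain the same keys, and the dict is the initial dict plus the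
-- discovered nodes inserted at w
lemma stepFold_corr (w : Int) : ∀ (l : List String) (d : PySem.Dict String Int)
    (S : PySem.Set String) (acc : List String),
    (∀ k, d.contains k = PySem.Set.contains S k) →
    (l.foldl (pvStep w) (d, acc)).2 = (l.foldl pvStepB (S, acc)).2
    ∧ (∀ k, (l.foldl (pvStep w) (d, acc)).1.contains k
          = PySem.Set.contains (l.foldl pvStepB (S, acc)).1 k)
    ∧ (∃ nuovi, (l.foldl (pvStep w) (d, acc)).2 = acc ++ nuovi
          ∧ (l.foldl (pvStep w) (d, acc)).1 = nuovi.foldl (fun d v => d.insert v w) d) := by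
  intro l
  induction l with
  | nil =>
    intro d S acc hd
    exact ⟨rfl, hd, [], by simp, rfl⟩
  | cons v t ih =>
    intro d S acc hd
    by_cases h : d.contains v = true
    · have hS : v ∈ S := (PySem.Set.contains_iff S v).mp (by rw [← hd]; exact h)
      have hstep : pvStep w (d, acc) v = (d, acc) := by simp [pvStep, h]
      have hstepB : pvStepB (S, acc) v = (S, acc) := by simp [pvStepB, hS]
      rw [List.foldl_cons, List.foldl_cons, hstep, hstepB]
      exact ih d S acc hd
    · have hS : v ∉ S := by
        rw [← PySem.Set.contains_iff, ← hd]; simpa using h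
      have hstep : pvStep w (d, acc) v = (d.insert v w, acc ++ [v]) := by simp [pvStep, h]
      have hstepB : pvStepB (S, acc) v = (PySem.Set.add S v, acc ++ [v]) := by
        simp [pvStepB, hS]
      rw [List.foldl_cons, List.foldl_cons, hstep, hstepB]
      have hd' : ∀ k, (d.insert v w).contains k = PySem.Set.contains (PySem.Set.add S v) k := by
        intro k
        by_cases hk : k = v
        · subst hk
          simp [PySem.Set.contains_iff, PySem.Set.mem_add]
        · have h1 : (d.insert v w).contains k = d.contains k := by
            simp [PySem.Dict.contains_insert, hk]
          have h2 : PySem.Set.contains (PySem.Set.add S v) k = PySem.Set.contains S k := by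
            rcases hc : PySem.Set.contains S k with _ | _
            · simp only [Bool.eq_false_iff, Ne, PySem.Set.contains_iff] at hc ⊢
              rw [PySem.Set.mem_add]; tauto
            · rw [PySem.Set.contains_iff] at hc ⊢
              rw [PySem.Set.mem_add]; tauto
          rw [h1, h2, hd]
      obtain ⟨c1, c2, nuovi, c3, c4⟩ := ih (d.insert v w) (PySem.Set.add S v) (acc ++ [v]) hd'
      exact ⟨c1, c2, v :: nuovi, by simpa using c3, c4⟩

lemma vicini_subset (g : List (String × List (String × Int))) (c : String) :
    ∀ v ∈ pvVicini g c, v ∈ g.flatMap (fun p => p.2.map (·.1)) := by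
  induction g with
  | nil =>
    intro v hv
    have h0 : pvVicini [] c = [] := rfl
    rw [h0] at hv
    exact absurd hv (List.not_mem_nil)
  | cons p t ih =>
    obtain ⟨pk, pv⟩ := p
    intro v hv
    by_cases hp : (pk == c) = true
    · have heq : pvVicini ((pk, pv) :: t) c = pv.map (·.1) := by
        simp [pvVicini, PySem.Dict.getD_eq_get?_getD, PySem.Dict.get?_mk_cons, hp]
      rw [heq] at hv
      exact List.mem_flatMap.mpr ⟨(pk, pv), List.mem_cons_self, hv⟩
    · have heq : pvVicini ((pk, pv) :: t) c = pvVicini t c := by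
        simp [pvVicini, PySem.Dict.getD_eq_get?_getD, PySem.Dict.get?_mk_cons, hp]
      rw [heq] at hv
      rcases List.mem_flatMap.mp (ih v hv) with ⟨q, hq, hv'⟩
      exact List.mem_flatMap.mpr ⟨q, List.mem_cons_of_mem _ hq, hv'⟩

lemma size_le_of_keys_subset (d : PySem.Dict String Int) (U : List String)
    (h1 : d.keys.Nodup) (h2 : ∀ k ∈ d.keys, k ∈ U) : d.size ≤ U.length := by
  have hle := (List.subperm_of_subset h1 (fun _ hm => h2 _ hm)).length_le
  simpa [PySem.Dict.keys, PySem.Dict.size] using hle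

-- A consumes one whole BFS level node by node, computing exactly the level step
lemma levelSim (g : List (String × List (String × Int))) :
    ∀ (cur : List String) (fA : Nat) (d : PySem.Dict String Int) (acc : List String) (l : Int),
    (∀ c ∈ cur, d.contains c = true ∧ d.getD c 0 = l) →
    pvLoopA g (fA + cur.length) d (cur ++ acc) =
      pvLoopA g fA (pvLevel g (l+1) (d, acc) cur).1 (pvLevel g (l+1) (d, acc) cur).2 := by
  intro cur
  induction cur with
  | nil => intro fA d acc l _; simp [pvLevel]
  | cons c cs ih =>
    intro fA d acc l hcur
    have hc := hcur c List.mem_cons_self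
    have hlen : fA + (c :: cs).length = (fA + cs.length) + 1 := by
      simp only [List.length_cons]; omega
    rw [hlen, List.cons_append, loopA_cons, hc.2, stepFold_shift]
    dsimp only
    have hsplit : (cs ++ acc) ++ ((pvVicini g c).foldl (pvStep (l+1)) (d, [])).2
        = cs ++ (acc ++ ((pvVicini g c).foldl (pvStep (l+1)) (d, [])).2) := by simp
    rw [hsplit,
      ih fA ((pvVicini g c).foldl (pvStep (l+1)) (d, [])).1
        (acc ++ ((pvVicini g c).foldl (pvStep (l+1)) (d, [])).2) l ?_]
    · have hlev : pvLevel g (l+1) (d, acc) (c :: cs)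
          = pvLevel g (l+1) (((pvVicini g c).foldl (pvStep (l+1)) (d, [])).1,
              acc ++ ((pvVicini g c).foldl (pvStep (l+1)) (d, [])).2) cs := by
        simp only [pvLevel, List.foldl_cons]
        rw [stepFold_shift]
      rw [hlev]
    · intro c' hc'
      have hc'' := hcur c' (List.mem_cons_of_mem _ hc')
      have hpres := ((stepFold_inv (l+1) (pvVicini g c) d []).1) c' hc''.1
      exact ⟨hpres.1, by rw [hpres.2, hc''.2]⟩

-- the main simulation: with sufficient fuel on both sides, A's queue loop computes the
-- pending levels of B and inserts them level by level at increasing distances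
lemma loopSim (g : List (String × List (String × Int))) (U : List String)
    (hU : ∀ v ∈ g.flatMap (fun p => p.2.map (·.1)), v ∈ U) :
    ∀ (fB : Nat) (d : PySem.Dict String Int) (vis : PySem.Set String)
      (front : List String) (l : Int) (fA : Nat),
    (∀ c ∈ front, d.contains c = true ∧ d.getD c 0 = l) →
    (∀ k, d.contains k = PySem.Set.contains vis k) →
    d.keys.Nodup →
    (∀ k ∈ d.keys, k ∈ U) →
    front.length + (U.length - d.size) ≤ fA →
    (U.length - d.size) + 1 ≤ fB →
    pvLoopA g fA d front = pvInsFrom d ((pvLivelli g fB vis front).drop 1) (l+1) := by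
  intro fB
  induction fB with
  | zero => intro d vis front l fA _ _ _ _ _ hB; omega
  | succ f ih =>
    intro d vis front l fA hfront hvis hnd hsub hA hB
    match front with
    | [] => rw [loopA_nil, livelli_nil]; rfl
    | c :: cs =>
      have hflen : (c :: cs).length ≤ fA := le_trans (Nat.le_add_right _ _) hA
      have h2 := levelSim g (c :: cs) (fA - (c :: cs).length) d [] l hfront
      rw [List.append_nil] at h2
      rw [show fA = (fA - (c :: cs).length) + (c :: cs).length from by omega, h2, livelli_cons]
      have hst : pvLevel g (l+1) (d, []) (c :: cs)
          = ((c :: cs).flatMap (pvVicini g)).foldl (pvStep (l+1)) (d, []) := by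
        rw [pvLevel, List.foldl_flatMap]
      have hstB : (c :: cs).foldl (fun st c' => (pvVicini g c').foldl pvStepB st) (vis, [])
          = ((c :: cs).flatMap (pvVicini g)).foldl pvStepB (vis, []) := by
        rw [List.foldl_flatMap]
      obtain ⟨i1, i2, i3, i4, i5⟩ := stepFold_inv (l+1) ((c :: cs).flatMap (pvVicini g)) d []
      rw [← hst] at i1 i2 i3 i4 i5
      obtain ⟨c1, c2, nuovi, c3, c4⟩ :=
        stepFold_corr (l+1) ((c :: cs).flatMap (pvVicini g)) d vis [] hvis
      rw [← hst, ← hstB] at c1 c2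
      rw [← hst] at c3 c4
      rw [List.nil_append] at c3
      -- abbreviations
      set stA := pvLevel g (l+1) (d, []) (c :: cs) with hstA
      set stB := (c :: cs).foldl (fun st c' => (pvVicini g c').foldl pvStepB st) (vis, []) with hstBdef
      -- facts about the new state
      have hfront' : ∀ x ∈ stA.2, stA.1.contains x = true ∧ stA.1.getD x 0 = l + 1 := by
        intro x hx
        rcases i2 x hx with hq | ⟨_, hc', hg⟩
        · exact absurd hq (List.not_mem_nil)
        · exact ⟨hc', hg⟩
      have hnd' : stA.1.keys.Nodup := i4 hnd
      have hsub' : ∀ k ∈ stA.1.keys, k ∈ U := by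
        intro k hk
        rcases i3 k hk with hk' | hk'
        · exact hsub k hk'
        · rcases List.mem_flatMap.mp hk' with ⟨c', _, hm⟩
          exact hU k (vicini_subset g c' k hm)
      have hszle : stA.1.size ≤ U.length := size_le_of_keys_subset _ U hnd' hsub'
      have hsz : stA.1.size = d.size + stA.2.length := by simpa using i5
      have hdsz : d.size ≤ U.length := size_le_of_keys_subset _ U hnd hsub
      -- case on whether a new level was discovered
      subst c3
      cases hn : stA.2 with
      | nil =>
        rw [hn] at c4
        simp only [List.foldl_nil] at c4
        rw [hn] at c1
        simp only [List.drop_succ_cons, List.drop_zero]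
        rw [← c1, livelli_nil, loopA_nil, c4]
        rfl
      | cons x xs =>
        rw [hn] at c4 c1 hfront' hsz
        have hf' : ∃ f', f = f' + 1 := by
          refine ⟨f - 1, ?_⟩
          simp only [List.length_cons] at hsz
          omega
        obtain ⟨f', rfl⟩ := hf'
        simp only [List.drop_succ_cons, List.drop_zero]
        rw [← c1, livelli_cons]
        have hunf : pvInsFrom d
            ((x :: xs) :: pvLivelli g f'
              (((x :: xs).foldl (fun st c' => (pvVicini g c').foldl pvStepB st) (stB.1, [])).1)
              (((x :: xs).foldl (fun st c' => (pvVicini g c').foldl pvStepB st) (stB.1, [])).2)) (l+1)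
            = pvInsFrom ((x :: xs).foldl (fun d v => d.insert v (l+1)) d)
              (pvLivelli g f'
                (((x :: xs).foldl (fun st c' => (pvVicini g c').foldl pvStepB st) (stB.1, [])).1)
                (((x :: xs).foldl (fun st c' => (pvVicini g c').foldl pvStepB st) (stB.1, [])).2)) (l+1+1) := rfl
        rw [hunf, ← c4]
        have hih := ih stA.1 stB.1 (x :: xs) (l+1) (fA - (c :: cs).length)
          hfront' c2 hnd' hsub'
          (by simp only [List.length_cons] at hsz hA ⊢; omega)
          (by simp only [List.length_cons] at hsz hB ⊢; omega)
        rw [hih, livelli_cons]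
        simp only [List.drop_succ_cons, List.drop_zero]

-- the per-source BFS of A equals B's two-phase computation
lemma sourceSim (g : List (String × List (String × Int))) (s : String) :
    pvLoopA g (pvFuel g) (PySem.Dict.ofList [(s, 0)]) [s]
      = pvInsFrom PySem.Dict.empty (pvLivelli g (pvFuel g) (PySem.Set.ofList [s]) [s]) 0 := by
  have hd : PySem.Dict.ofList [(s, (0 : Int))] = PySem.Dict.empty.insert s 0 := rfl
  have hvisL : PySem.Set.ofList [s] = [s] := rfl
  have hkeys : (PySem.Dict.empty.insert s (0 : Int)).keys = [s] := by
    rw [PySem.Dict.keys_insert_of_not_contains _ _ (by simp)]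
    simp [PySem.Dict.keys_empty]
  have hsz : (PySem.Dict.empty.insert s (0 : Int)).size = 1 := by
    rw [PySem.Dict.size_insert]
    simp [PySem.Dict.contains_empty, PySem.Dict.size_empty]
  have hvis : ∀ k, (PySem.Dict.empty.insert s (0 : Int)).contains k
      = PySem.Set.contains (PySem.Set.ofList [s]) k := by
    intro k
    rw [hvisL]
    by_cases hk : k = s
    · subst hk
      simp
    · have h1 : (PySem.Dict.empty.insert s (0 : Int)).contains k = false := by
        simp [PySem.Dict.contains_insert, hk, PySem.Dict.contains_empty]
      have h2 : PySem.Set.contains [s] k = false := by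
        simp only [Bool.eq_false_iff, Ne, PySem.Set.contains_iff]
        simp [hk]
      rw [h1, h2]
  have hmain := loopSim g (s :: g.flatMap (fun p => p.2.map (·.1)))
    (fun v hv => List.mem_cons_of_mem _ hv)
    (pvFuel g) (PySem.Dict.empty.insert s 0) (PySem.Set.ofList [s]) [s] 0 (pvFuel g)
    (fun c hc => by simp only [List.mem_singleton] at hc; subst hc; simp)
    hvis
    (by rw [hkeys]; simp)
    (fun k hk => by rw [hkeys] at hk; simp at hk; simp [hk])
    (by simp only [pvFuel, hsz, List.length_cons, List.length_nil]; omega)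
    (by simp only [pvFuel, hsz, List.length_cons, List.length_nil]; omega)
  rw [hd, hmain]
  have hfuel : ∃ m, pvFuel g = m + 1 := ⟨(g.flatMap (fun p => p.2.map (·.1))).length, rfl⟩
  obtain ⟨m, hm⟩ := hfuel
  rw [hm, livelli_cons]
  simp only [List.drop_succ_cons, List.drop_zero]
  have h01 : ((0 : Int) + 1) = 1 := by norm_num
  have hstep : pvInsFrom PySem.Dict.empty
      ([s] :: pvLivelli g m
        (([s].foldl (fun st c' => (pvVicini g c').foldl pvStepB st) (PySem.Set.ofList [s], [])).1)
        (([s].foldl (fun st c' => (pvVicini g c').foldl pvStepB st) (PySem.Set.ofList [s], [])).2)) 0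
      = pvInsFrom (PySem.Dict.empty.insert s 0)
        (pvLivelli g m
          (([s].foldl (fun st c' => (pvVicini g c').foldl pvStepB st) (PySem.Set.ofList [s], [])).1)
          (([s].foldl (fun st c' => (pvVicini g c').foldl pvStepB st) (PySem.Set.ofList [s], [])).2)) (0+1) := rfl
  rw [hstep, h01]

-- ===== VERDICT (by name: the statement is the Claim_ definition above) =====
theorem costruisci_distanze_bfs_spec : Claim_equal_costruisci_distanze_bfs := by
  intro g ni _
  unfold Spec_costruisci_distanze_bfs costruisci_distanze_bfs costruisci_distanze_bfs_alt
  have hf : (fun (acc : PySem.Dict String (List (String × Int))) (s : String) =>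
        acc.insert s (pvLoopA g (pvFuel g) (PySem.Dict.ofList [(s, 0)]) [s]).items)
      = (fun (acc : PySem.Dict String (List (String × Int))) (s : String) =>
        let livelli := pvLivelli g (pvFuel g) (PySem.Set.ofList [s]) [s]
        acc.insert s
          ((PySem.List.enumerate livelli 0).foldl
            (fun (dist_sorg : PySem.Dict String Int) pl =>
              pl.2.foldl (fun (dist_sorg : PySem.Dict String Int) nodo => dist_sorg.insert nodo pl.1) dist_sorg)
            PySem.Dict.empty).items) := by
    funext acc s
    show _ = acc.insert s
      ((PySem.List.enumerate (pvLivelli g (pvFuel g) (PySem.Set.ofList [s]) [s]) 0).foldl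
        (fun (dist_sorg : PySem.Dict String Int) pl =>
          pl.2.foldl (fun (dist_sorg : PySem.Dict String Int) nodo => dist_sorg.insert nodo pl.1) dist_sorg)
        PySem.Dict.empty).items
    rw [enumFold, sourceSim g s]
  rw [hf]
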